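-- pv_equiv track=rewrite | github.com/Mohamedragih1/Many-Time-Pad-Cracker | main.py | assign_spaces
-- ===== SOURCE A (Python) =====
-- def assign_spaces(decimal_cipher, boolean_array):
--     """
--     Assigns spaces to positions in the boolean array where spaces are detected in the cipher text
--     by XORing pairs of cipher lines and checking if they produce printable characters.
--
--     Args:
--         decimal_cipher (list of list of int): A list of lists where each sublist contains decimal integers
--                                               representing cipher text.
--         boolean_array (list of list of bool): A list of lists used to mark positions where spaces are likely to appear.
--
--     Returns:
--         list of list of bool: The updated boolean array where `True` indicates that a space is likely in that position.
--     """
--     for column in range(len(decimal_cipher[0])):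
--         for fixed_line in range(8):
--             is_valid = True
--             for variable_line in range(8):
--                 result = decimal_cipher[fixed_line][column] ^ decimal_cipher[variable_line][column]
--                 if not (32 <= result <= 126 or result == 0):
--                     is_valid = False
--                     break
--             boolean_array[fixed_line][column] = is_valid
--     return boolean_array
-- ===== SOURCE B (Python) =====
-- def assign_spaces(decimal_cipher, boolean_array):
--     # Mutates boolean_array in place (same side effect as the original) and returns it.
--     for column in range(len(decimal_cipher[0])):
--         valid = [True] * 8
--         for i in range(8):
--             for j in range(i + 1, 8):
--                 r = decimal_cipher[i][column] ^ decimal_cipher[j][column]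
--                 if not (32 <= r <= 126 or r == 0):
--                     valid[i] = False
--                     valid[j] = False
--         for i in range(8):
--             boolean_array[i][column] = valid[i]
--     return boolean_array
-- ===== Notes on version B (the rewrite author's own statement) =====
-- stated objective: alternative
-- what changed: Per column, instead of eight separate full scans (one all-check per line with early break), B makes a single pass over the 28 unordered pairs (i<j), marking both lines invalid on a non-printable XOR, using the symmetry of XOR and that the diagonal XOR is 0.
import Mathlib
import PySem

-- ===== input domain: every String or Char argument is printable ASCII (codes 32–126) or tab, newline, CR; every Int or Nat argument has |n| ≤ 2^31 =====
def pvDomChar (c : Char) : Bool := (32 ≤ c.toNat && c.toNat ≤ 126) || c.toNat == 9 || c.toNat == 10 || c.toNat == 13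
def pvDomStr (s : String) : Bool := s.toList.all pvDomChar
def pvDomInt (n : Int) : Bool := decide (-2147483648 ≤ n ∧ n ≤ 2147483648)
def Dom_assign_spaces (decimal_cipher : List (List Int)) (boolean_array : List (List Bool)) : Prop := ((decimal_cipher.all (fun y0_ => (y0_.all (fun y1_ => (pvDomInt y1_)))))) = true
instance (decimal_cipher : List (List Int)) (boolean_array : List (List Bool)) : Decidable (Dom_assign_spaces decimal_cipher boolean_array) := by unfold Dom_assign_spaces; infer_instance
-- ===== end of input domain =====

-- B replaces A's eight full row-scans per column by one pass over the 28 unordered pairs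
-- (XOR is symmetric, the diagonal XOR is 0). Both A and B mutate boolean_array in place in
-- Python and return it; the equivalence proved here is about the returned value.

-- shared element access: decimal_cipher[i][col] (in range under Pre_; default 0 outside)
def getI (dc : List (List Int)) (i col : Nat) : Int := (dc.getD i []).getD col 0

-- boolean_array[i][col] = v  (in range under Pre_; List.set clamps outside)
def set2 (ba : List (List Bool)) (i col : Nat) (v : Bool) : List (List Bool) :=
  ba.set i ((ba.getD i []).set col v)

-- ===== PORT A =====
-- the inner 'for variable_line in range(8)' with the break: false stops the scan
def loopA (dc : List (List Int)) (col fixed : Nat) : List Nat → Bool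
  | [] => true
  | v :: rest =>
      let result := PySem.Int.bxor (getI dc fixed col) (getI dc v col)
      if ¬ (32 ≤ result ∧ result ≤ 126 ∨ result = 0) then false
      else loopA dc col fixed rest

def assign_spaces (decimal_cipher : List (List Int)) (boolean_array : List (List Bool)) : List (List Bool) :=
  (List.range (decimal_cipher.headD []).length).foldl
    (fun ba column =>
      (List.range 8).foldl
        (fun ba fixed => set2 ba fixed column (loopA decimal_cipher column fixed (List.range 8)))
        ba)
    boolean_array

-- ===== PORT B =====
-- one step of the pair loop: on a non-printable XOR mark both lines invalid
def pairStep (dc : List (List Int)) (col : Nat) (valid : List Bool) (p : Nat × Nat) : List Bool :=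
  let r := PySem.Int.bxor (getI dc p.1 col) (getI dc p.2 col)
  if ¬ (32 ≤ r ∧ r ≤ 126 ∨ r = 0) then (valid.set p.1 false).set p.2 false else valid

-- the pairs (i, j) with i < j < 8, as Source B's nested 'for i … for j in range(i+1, 8)'
def pairs8 : List (Nat × Nat) :=
  (List.range 8).flatMap (fun i => (List.range' (i+1) (7-i)).map (fun j => (i, j)))

def assign_spaces_alt (decimal_cipher : List (List Int)) (boolean_array : List (List Bool)) : List (List Bool) :=
  (List.range (decimal_cipher.headD []).length).foldl
    (fun ba column =>
      let valid := pairs8.foldl (pairStep decimal_cipher column) (List.replicate 8 true)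
      (List.range 8).foldl (fun ba i => set2 ba i column (valid.getD i true)) ba)
    boolean_array

-- ===== PRECONDITION & SPEC =====
-- Pre_ = exactly where Python A returns: decimal_cipher nonempty (len(decimal_cipher[0]) is
-- evaluated), and, when there is at least one column, both arrays have ≥ 8 rows whose first 8
-- rows each cover every column index (otherwise A raises IndexError).
def Pre_assign_spaces (decimal_cipher : List (List Int)) (boolean_array : List (List Bool)) : Prop :=
  decimal_cipher ≠ [] ∧
  ((decimal_cipher.headD []).length = 0 ∨
    (8 ≤ decimal_cipher.length ∧
     (∀ row ∈ decimal_cipher.take 8, (decimal_cipher.headD []).length ≤ row.length) ∧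
     8 ≤ boolean_array.length ∧
     (∀ row ∈ boolean_array.take 8, (decimal_cipher.headD []).length ≤ row.length)))
instance (decimal_cipher : List (List Int)) (boolean_array : List (List Bool)) : Decidable (Pre_assign_spaces decimal_cipher boolean_array) := by unfold Pre_assign_spaces; infer_instance

def pvWitness_assign_spaces : List (List Int) × List (List Bool) :=
  ([[32], [0], [65], [97], [32], [50], [126], [40]],
   [[false], [false], [false], [false], [false], [false], [false], [false]])

def Spec_assign_spaces (decimal_cipher : List (List Int)) (boolean_array : List (List Bool)) (out : List (List Bool)) : Prop := out = assign_spaces_alt decimal_cipher boolean_array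
instance (decimal_cipher : List (List Int)) (boolean_array : List (List Bool)) (out : List (List Bool)) : Decidable (Spec_assign_spaces decimal_cipher boolean_array out) := by unfold Spec_assign_spaces; infer_instance

-- ===== CLAIM (what is proved, stated in full; the proofs are below) =====
def Claim_equal_assign_spaces : Prop := ∀ (decimal_cipher : List (List Int)) (boolean_array : List (List Bool)), Dom_assign_spaces decimal_cipher boolean_array → Pre_assign_spaces decimal_cipher boolean_array → Spec_assign_spaces decimal_cipher boolean_array (assign_spaces decimal_cipher boolean_array)

-- ===== LEMMAS AND PROOFS =====

-- the printability test, abstracted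
def xorOk (dc : List (List Int)) (col i j : Nat) : Bool :=
  decide (32 ≤ PySem.Int.bxor (getI dc i col) (getI dc j col) ∧
          PySem.Int.bxor (getI dc i col) (getI dc j col) ≤ 126 ∨
          PySem.Int.bxor (getI dc i col) (getI dc j col) = 0)

lemma xorOk_self (dc : List (List Int)) (col i : Nat) : xorOk dc col i i = true := by
  simp [xorOk, PySem.Int.bxor_self]

lemma xorOk_symm (dc : List (List Int)) (col i j : Nat) : xorOk dc col i j = xorOk dc col j i := by
  simp [xorOk, PySem.Int.bxor_comm]

lemma loopA_all (dc : List (List Int)) (col fixed : Nat) (L : List Nat) :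
    loopA dc col fixed L = L.all (fun v => xorOk dc col fixed v) := by
  induction L with
  | nil => rfl
  | cons v rest ih =>
    rw [List.all_cons, ← ih]
    simp only [loopA]
    by_cases h : (32 ≤ PySem.Int.bxor (getI dc fixed col) (getI dc v col) ∧
          PySem.Int.bxor (getI dc fixed col) (getI dc v col) ≤ 126 ∨
          PySem.Int.bxor (getI dc fixed col) (getI dc v col) = 0)
    · have hx : xorOk dc col fixed v = true := by simp [xorOk, h]
      simp [h, hx]
    · have hx : xorOk dc col fixed v = false := by simp [xorOk, h]
      simp [h, hx]

lemma getD_set_self (v : List Bool) (i : Nat) (b : Bool) (h : i < v.length) :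
    (v.set i b).getD i true = b := by
  simp [List.getD, h]

lemma getD_set_ne (v : List Bool) (i k : Nat) (b : Bool) (h : k ≠ i) :
    (v.set i b).getD k true = v.getD k true := by
  simp [List.getD, List.getElem?_set_ne (Ne.symm h)]

lemma pairFold_getD (dc : List (List Int)) (col : Nat) :
    ∀ (P : List (Nat × Nat)) (v : List Bool) (k : Nat), k < v.length →
      (P.foldl (pairStep dc col) v).getD k true
        = (v.getD k true &&
           P.all (fun p => (!(p.1 == k || p.2 == k)) || xorOk dc col p.1 p.2)) := by
  intro P
  induction P with
  | nil => intro v k hk; simp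
  | cons p P ih =>
    intro v k hk
    simp only [List.foldl_cons, List.all_cons]
    by_cases h : (32 ≤ PySem.Int.bxor (getI dc p.1 col) (getI dc p.2 col) ∧
          PySem.Int.bxor (getI dc p.1 col) (getI dc p.2 col) ≤ 126 ∨
          PySem.Int.bxor (getI dc p.1 col) (getI dc p.2 col) = 0)
    · have hstep : pairStep dc col v p = v := by simp [pairStep, h]
      have hok : xorOk dc col p.1 p.2 = true := by simp [xorOk, h]
      rw [hstep, ih v k hk, hok]
      simp
    · have hstep : pairStep dc col v p = (v.set p.1 false).set p.2 false := by
        simp [pairStep, h]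
      have hok : xorOk dc col p.1 p.2 = false := by simp [xorOk, h]
      have hlen : k < ((v.set p.1 false).set p.2 false).length := by simpa using hk
      rw [hstep, ih _ k hlen, hok]
      by_cases h2 : k = p.2
      · subst h2
        rw [getD_set_self _ _ _ (by simpa using hk)]
        simp
      · rw [getD_set_ne _ _ _ _ h2]
        by_cases h1 : k = p.1
        · subst h1
          rw [getD_set_self _ _ _ hk]
          simp
        · rw [getD_set_ne _ _ _ _ h1]
          have : (p.1 == k || p.2 == k) = false := by
            simp [Ne.symm h1, Ne.symm h2]
          simp [this]

lemma pairs8_eq : pairs8 = [(0,1),(0,2),(0,3),(0,4),(0,5),(0,6),(0,7),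
    (1,2),(1,3),(1,4),(1,5),(1,6),(1,7),
    (2,3),(2,4),(2,5),(2,6),(2,7),
    (3,4),(3,5),(3,6),(3,7),
    (4,5),(4,6),(4,7),
    (5,6),(5,7),
    (6,7)] := by decide

lemma range8_eq : List.range 8 = [0,1,2,3,4,5,6,7] := by decide

set_option maxRecDepth 32000 in
-- per line k < 8, B's valid[k] equals A's all-scan result (XOR symmetry + zero diagonal)
lemma valid_eq (dc : List (List Int)) (col k : Nat) (hk : k < 8) :
    (pairs8.foldl (pairStep dc col) (List.replicate 8 true)).getD k true
      = loopA dc col k (List.range 8) := by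
  rw [loopA_all, pairFold_getD dc col pairs8 (List.replicate 8 true) k (by simpa using hk),
      pairs8_eq, range8_eq]
  interval_cases k <;>
  · simp only [List.all_cons, List.all_nil]
    simp [xorOk_self, xorOk_symm]

-- the two per-column updates coincide (for every column, on every accumulator)
lemma col_eq (dc : List (List Int)) (col : Nat) (ba : List (List Bool)) :
    (List.range 8).foldl
        (fun ba fixed => set2 ba fixed col (loopA dc col fixed (List.range 8))) ba
      = (List.range 8).foldl
          (fun ba i =>
            set2 ba i col ((pairs8.foldl (pairStep dc col) (List.replicate 8 true)).getD i true))
          ba := by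
  have h : ∀ k, k < 8 →
      (pairs8.foldl (pairStep dc col) (List.replicate 8 true)).getD k true
        = loopA dc col k (List.range 8) := valid_eq dc col
  rw [range8_eq]
  simp only [List.foldl_cons, List.foldl_nil,
    h 0 (by norm_num), h 1 (by norm_num), h 2 (by norm_num), h 3 (by norm_num),
    h 4 (by norm_num), h 5 (by norm_num), h 6 (by norm_num), h 7 (by norm_num)]
  rw [range8_eq]

-- pointwise-equal step functions give equal folds
lemma foldl_fun_congr {α β : Type} (f g : β → α → β) (l : List α) (init : β)
    (h : ∀ b a, f b a = g b a) : l.foldl f init = l.foldl g init := by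
  induction l generalizing init with
  | nil => rfl
  | cons a l ih => simp only [List.foldl_cons, h]; exact ih _

-- ===== VERDICT (by name: the statement is the Claim_ definition above) =====
theorem assign_spaces_spec : Claim_equal_assign_spaces := by
  intro dc ba _ _
  show assign_spaces dc ba = assign_spaces_alt dc ba
  unfold assign_spaces assign_spaces_alt
  exact foldl_fun_congr _ _ _ _ (fun b col => col_eq dc col b)
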